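-- pv_equiv track=rewrite | github.com/BamBalaam/advent-of-code | 2024/day3/day3.py | manage_conditionals
-- ===== SOURCE A (Python) =====
-- def manage_conditionals(instructions):
--     final_instructions = []
--     consume_flag = True
--     for instruction in instructions:
--         if instruction == ["don't"]:
--             consume_flag = False
--             continue
--         if instruction == ["do"]:
--             consume_flag = True
--             continue
--         if consume_flag:
--             final_instructions.append(instruction)
--     return final_instructions
-- ===== SOURCE B (Python) =====
-- def manage_conditionals(instructions):
--     final_instructions = []
--     i = 0
--     n = len(instructions)
--     while i < n:
--         instruction = instructions[i]
--         if instruction == ["don't"]: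
--             # skip the disabled region: everything up to and including the next ["do"]
--             i += 1
--             while i < n and instructions[i] != ["do"]:
--                 i += 1
--             i += 1  # consume the closing ["do"] (or step past the end)
--         elif instruction == ["do"]:
--             i += 1
--         else:
--             final_instructions.append(instruction)
--             i += 1
--     return final_instructions
-- ===== Notes on version B (the rewrite author's own statement) =====
-- stated objective: alternative
-- what changed: Replaced the per-element boolean consume-flag with an index-driven collect-then-skip traversal: a disabled region is skipped by an inner loop that advances past everything up to and including the next ["do"], so no flag state is carried across elements.
import Mathlib
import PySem

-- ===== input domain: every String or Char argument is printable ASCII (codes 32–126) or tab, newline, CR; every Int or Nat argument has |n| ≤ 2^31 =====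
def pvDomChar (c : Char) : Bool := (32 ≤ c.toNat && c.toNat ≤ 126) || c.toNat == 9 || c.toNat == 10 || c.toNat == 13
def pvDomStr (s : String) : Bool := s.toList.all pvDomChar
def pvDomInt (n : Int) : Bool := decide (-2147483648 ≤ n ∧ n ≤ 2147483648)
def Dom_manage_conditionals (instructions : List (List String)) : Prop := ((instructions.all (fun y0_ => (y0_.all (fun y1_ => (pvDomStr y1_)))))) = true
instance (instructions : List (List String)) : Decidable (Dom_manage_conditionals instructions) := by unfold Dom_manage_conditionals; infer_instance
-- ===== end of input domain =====

-- B replaces A's per-element boolean consume-flag with an index-driven collect-then-skip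
-- traversal (skip a disabled region in an inner loop); same result, alternative decomposition.


-- ===== PORT A =====
-- A's loop: final_instructions accumulator and consume_flag carried through the list.
def mcLoopA : List (List String) → List (List String) → Bool → List (List String)
  | [], acc, _ => acc
  | x :: xs, acc, flag =>
    if x = ["don't"] then mcLoopA xs acc false
    else if x = ["do"] then mcLoopA xs acc true
    else mcLoopA xs (if flag then acc ++ [x] else acc) flag

def manage_conditionals (instructions : List (List String)) : List (List String) :=
  mcLoopA instructions [] true

-- ===== PORT B =====
-- B's inner while loop: advance past everything up to and including the next ["do"].
def mcSkip : List (List String) → List (List String)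
  | [] => []
  | y :: ys => if y = ["do"] then ys else mcSkip ys

theorem mcSkip_length_le (xs : List (List String)) : (mcSkip xs).length ≤ xs.length := by
  induction xs with
  | nil => simp [mcSkip]
  | cons y ys ih =>
    simp only [mcSkip]
    split <;> simp
    omega

-- B's outer loop: collect, skipping disabled regions wholesale.
def manage_conditionals_alt (instructions : List (List String)) : List (List String) :=
  match instructions with
  | [] => []
  | x :: xs =>
    if x = ["don't"] then manage_conditionals_alt (mcSkip xs)
    else if x = ["do"] then manage_conditionals_alt xs
    else x :: manage_conditionals_alt xs
termination_by instructions.length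
decreasing_by
  · exact Nat.lt_succ_of_le (mcSkip_length_le xs)
  · simp
  · simp

-- ===== PRECONDITION & SPEC =====
def Spec_manage_conditionals (instructions : List (List String)) (out : List (List String)) : Prop := out = manage_conditionals_alt instructions
instance (instructions : List (List String)) (out : List (List String)) : Decidable (Spec_manage_conditionals instructions out) := by unfold Spec_manage_conditionals; infer_instance

-- ===== CLAIM (what is proved, stated in full; the proofs are below) =====
def Claim_equal_manage_conditionals : Prop := ∀ (instructions : List (List String)), Dom_manage_conditionals instructions → Spec_manage_conditionals instructions (manage_conditionals instructions)

-- ===== LEMMAS AND PROOFS =====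

-- Mutual invariant: with the flag up, A's loop appends exactly B's result; with the flag
-- down it appends B's result on the list with the current disabled region skipped.
theorem mcLoopA_alt (n : Nat) :
    ∀ xs : List (List String), xs.length ≤ n → ∀ acc,
      mcLoopA xs acc true = acc ++ manage_conditionals_alt xs ∧
      mcLoopA xs acc false = acc ++ manage_conditionals_alt (mcSkip xs) := by
  induction n with
  | zero =>
    intro xs hlen acc
    have : xs = [] := List.eq_nil_of_length_eq_zero (Nat.le_zero.mp hlen)
    subst this
    simp [mcLoopA, manage_conditionals_alt, mcSkip]
  | succ n ih =>
    intro xs hlen acc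
    match xs with
    | [] => simp [mcLoopA, manage_conditionals_alt, mcSkip]
    | x :: xs =>
      have hx : xs.length ≤ n := by simpa using Nat.succ_le_succ_iff.mp hlen
      by_cases hd : x = ["don't"]
      · subst hd
        constructor
        · rw [show mcLoopA (["don't"] :: xs) acc true = mcLoopA xs acc false from by
            simp [mcLoopA]]
          rw [(ih xs hx acc).2]
          rw [show manage_conditionals_alt (["don't"] :: xs)
              = manage_conditionals_alt (mcSkip xs) from by
            rw [manage_conditionals_alt]; simp]
        · rw [show mcLoopA (["don't"] :: xs) acc false = mcLoopA xs acc false from by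
            simp [mcLoopA]]
          rw [(ih xs hx acc).2]
          rw [show mcSkip (["don't"] :: xs) = mcSkip xs from by simp [mcSkip]]
      · by_cases hdo : x = ["do"]
        · subst hdo
          constructor
          · rw [show mcLoopA (["do"] :: xs) acc true = mcLoopA xs acc true from by
              simp [mcLoopA]]
            rw [(ih xs hx acc).1]
            rw [show manage_conditionals_alt (["do"] :: xs)
                = manage_conditionals_alt xs from by
              rw [manage_conditionals_alt]; simp]
          · rw [show mcLoopA (["do"] :: xs) acc false = mcLoopA xs acc true from by
              simp [mcLoopA]]
            rw [(ih xs hx acc).1]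
            rw [show mcSkip (["do"] :: xs) = xs from by simp [mcSkip]]
        · constructor
          · rw [show mcLoopA (x :: xs) acc true = mcLoopA xs (acc ++ [x]) true from by
              simp [mcLoopA, hd, hdo]]
            rw [(ih xs hx (acc ++ [x])).1]
            rw [show manage_conditionals_alt (x :: xs)
                = x :: manage_conditionals_alt xs from by
              rw [manage_conditionals_alt]; simp [hd, hdo]]
            simp
          · rw [show mcLoopA (x :: xs) acc false = mcLoopA xs acc false from by
              simp [mcLoopA, hd, hdo]]
            rw [(ih xs hx acc).2]
            rw [show mcSkip (x :: xs) = mcSkip xs from by simp [mcSkip, hdo]]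

-- ===== VERDICT (by name: the statement is the Claim_ definition above) =====
theorem manage_conditionals_spec : Claim_equal_manage_conditionals := by
  intro xs _
  unfold Spec_manage_conditionals manage_conditionals
  simpa using (mcLoopA_alt xs.length xs le_rfl []).1
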